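-- pv_equiv track=rewrite | github.com/othi/aoc | 2024/2/part2.py | check_graduality
-- ===== SOURCE A (Python) =====
-- def check_graduality(report):
--     if report[0] > report[1]:
--         method = lambda l1, l2: l1 > l2
--     else:
--         method = lambda l1, l2: l1 < l2
--
--     for i in range(len(report) - 1):
--         if not method(report[i], report[i + 1]):
--             return False
--     return True
-- ===== SOURCE B (Python) =====
-- def check_graduality(report):
--     lst = list(report)
--     inc = sorted(set(lst))
--     return lst == inc or lst == list(reversed(inc))
-- ===== Notes on version B (the rewrite author's own statement) =====
-- stated objective: simpler
-- what changed: Replaces the direction-lambda plus adjacent-index scan with one sorted-set comparison: the report is safe iff it equals sorted(set(report)) or its reverse (strict monotonicity either way).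
import Mathlib
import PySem

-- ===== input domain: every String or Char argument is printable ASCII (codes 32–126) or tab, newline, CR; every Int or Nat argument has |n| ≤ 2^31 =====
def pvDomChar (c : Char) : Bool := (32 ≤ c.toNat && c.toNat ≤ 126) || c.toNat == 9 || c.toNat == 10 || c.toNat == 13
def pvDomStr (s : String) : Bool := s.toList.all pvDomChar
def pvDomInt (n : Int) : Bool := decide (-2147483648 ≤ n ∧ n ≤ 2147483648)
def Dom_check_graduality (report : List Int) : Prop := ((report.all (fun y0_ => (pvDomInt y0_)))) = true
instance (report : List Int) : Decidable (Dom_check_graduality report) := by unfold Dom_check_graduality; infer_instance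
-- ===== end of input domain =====

-- B replaces A's direction lambda + adjacent-index scan by one comparison of the
-- report with sorted(set(report)) / its reverse (objective: simpler).

-- ===== PORT A =====
-- the for-loop over range(len(report)-1) with early 'return False'
def chkLoop (report : List Int) (method : Int → Int → Bool) : List Int → Bool
  | [] => true
  | i :: rest =>
    match PySem.List.pyGet? report i, PySem.List.pyGet? report (i + 1) with
    | some a, some b => if method a b then chkLoop report method rest else false
    | _, _ => false   -- IndexError (never reached: range indices are in bounds)

def check_graduality (report : List Int) : Bool :=
  match PySem.List.pyGet? report 0, PySem.List.pyGet? report 1 with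
  | some r0, some r1 =>
    let method : Int → Int → Bool :=
      if r0 > r1 then fun l1 l2 => decide (l1 > l2) else fun l1 l2 => decide (l1 < l2)
    chkLoop report method (PySem.List.pyRange 0 ((report.length : Int) - 1) 1)
  | _, _ => false   -- IndexError at report[0]/report[1]; excluded by Pre_

-- ===== PORT B =====
def check_graduality_alt (report : List Int) : Bool :=
  let lst := report
  let inc := PySem.List.sorted (PySem.Set.ofList lst) (fun x => x) false
  lst == inc || lst == inc.reverse

-- ===== PRECONDITION & SPEC =====
-- Pre_ excludes exactly the inputs where A raises IndexError (fewer than 2 elements)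
def Pre_check_graduality (report : List Int) : Prop := 2 ≤ report.length
instance (report : List Int) : Decidable (Pre_check_graduality report) := by
  unfold Pre_check_graduality; infer_instance

def pvWitness_check_graduality : List Int := [1, 2, 3]

def Spec_check_graduality (report : List Int) (out : Bool) : Prop := out = check_graduality_alt report
instance (report : List Int) (out : Bool) : Decidable (Spec_check_graduality report out) := by
  unfold Spec_check_graduality; infer_instance

-- ===== CLAIM (what is proved, stated in full; the proofs are below) =====
def Claim_equal_check_graduality : Prop := ∀ (report : List Int), Dom_check_graduality report → Pre_check_graduality report → Spec_check_graduality report (check_graduality report)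

-- ===== LEMMAS AND PROOFS =====

-- adjacent-pair check, the structural shape of A's loop
def adj (m : Int → Int → Bool) : List Int → Bool
  | a :: b :: t => m a b && adj m (b :: t)
  | _ => true

lemma adj_short (m : Int → Int → Bool) (l : List Int) (h : l.length ≤ 1) :
    adj m l = true := by
  match l with
  | [] => rfl
  | [a] => rfl
  | a :: b :: t => simp at h

lemma chkLoop_drop (report : List Int) (m : Int → Int → Bool) :
    ∀ (d k : Nat), report.length - k ≤ d →
      chkLoop report m (PySem.List.pyRange (k : Int) ((report.length : Int) - 1) 1)
        = adj m (report.drop k) := by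
  intro d
  induction d with
  | zero =>
    intro k hk
    have hk' : report.length ≤ k := by omega
    rw [PySem.List.pyRange_one_eq_nil (by omega)]
    rw [List.drop_of_length_le hk']
    rfl
  | succ d ih =>
    intro k hk
    by_cases hlt : (k : Int) < (report.length : Int) - 1
    · have hk1 : k + 1 < report.length := by omega
      have hk0 : k < report.length := by omega
      rw [PySem.List.pyRange_one_cons hlt]
      show (match PySem.List.pyGet? report (k : Int), PySem.List.pyGet? report ((k : Int) + 1) with
        | some a, some b => if m a b then chkLoop report m (PySem.List.pyRange ((k : Int) + 1) ((report.length : Int) - 1) 1) else false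
        | _, _ => false) = adj m (report.drop k)
      have e1 : PySem.List.pyGet? report (k : Int) = some report[k] := by
        rw [PySem.List.pyGet?_natCast]; simp [List.getElem?_eq_getElem hk0]
      have e2 : PySem.List.pyGet? report ((k : Int) + 1) = some report[k + 1] := by
        have : ((k : Int) + 1) = ((k + 1 : Nat) : Int) := by push_cast; ring
        rw [this, PySem.List.pyGet?_natCast]; simp [List.getElem?_eq_getElem hk1]
      rw [e1, e2]
      have hdk : report.drop k = report[k] :: report[k + 1] :: report.drop (k + 2) := by
        rw [List.drop_eq_getElem_cons hk0]
        congr 1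
        rw [List.drop_eq_getElem_cons hk1]
      have hdk1 : report.drop (k + 1) = report[k + 1] :: report.drop (k + 2) := by
        rw [List.drop_eq_getElem_cons hk1]
      have ihk : chkLoop report m (PySem.List.pyRange ((k + 1 : Nat) : Int) ((report.length : Int) - 1) 1)
          = adj m (report.drop (k + 1)) := ih (k + 1) (by omega)
      have hcast : ((k : Int) + 1) = ((k + 1 : Nat) : Int) := by push_cast; ring
      rw [hcast, ihk, hdk, hdk1]
      by_cases hm : m report[k] report[k + 1] = true
      · simp [adj, hm]
      · simp [adj, hm]
    · rw [PySem.List.pyRange_one_eq_nil (by omega)]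
      have : (report.drop k).length ≤ 1 := by
        rw [List.length_drop]; omega
      rw [adj_short m _ this]
      rfl

lemma adj_iff_chain (m : Int → Int → Bool) (l : List Int) :
    adj m l = true ↔ l.IsChain (fun a b => m a b = true) := by
  match l with
  | [] => simp [adj]
  | [a] => simp [adj]
  | a :: b :: t =>
    rw [List.isChain_cons_cons]
    have := adj_iff_chain m (b :: t)
    simp [adj, this]

lemma adj_lt_iff (l : List Int) :
    adj (fun l1 l2 => decide (l1 < l2)) l = true ↔ l.Pairwise (· < ·) := by
  rw [adj_iff_chain]
  simp only [decide_eq_true_eq]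
  exact List.isChain_iff_pairwise

lemma adj_gt_iff (l : List Int) :
    adj (fun l1 l2 => decide (l1 > l2)) l = true ↔ l.Pairwise (· > ·) := by
  rw [adj_iff_chain]
  simp only [decide_eq_true_eq]
  exact List.isChain_iff_pairwise

lemma alt_iff (report : List Int) :
    check_graduality_alt report = true ↔
      report.Pairwise (· < ·) ∨ report.Pairwise (· > ·) := by
  unfold check_graduality_alt
  simp only [Bool.or_eq_true, beq_iff_eq]
  constructor
  · rintro (h | h)
    · left; rw [h]; exact PySem.List.sorted_ofList_pairwise_lt report
    · right
      have hp := PySem.List.sorted_ofList_pairwise_lt report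
      rw [h, List.pairwise_reverse]
      exact hp.imp (fun {a b} hab => hab)
  · rintro (h | h)
    · left
      have hnd : report.Nodup := h.imp (fun {a b} hab => ne_of_lt hab)
      rw [PySem.Set.ofList_eq_self_of_nodup report hnd]
      exact (PySem.List.sorted_eq_self_of_pairwise report (fun x => x)
        (h.imp (fun {a b} hab => le_of_lt hab))).symm
    · right
      have hnd : report.Nodup := h.imp (fun {a b} hab => ne_of_gt hab)
      rw [PySem.Set.ofList_eq_self_of_nodup report hnd]
      have hrev : report.reverse.Pairwise (fun a b => (fun x : Int => x) a < (fun x : Int => x) b) := by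
        rw [List.pairwise_reverse]; exact h.imp (fun {a b} hab => hab)
      have := PySem.List.sorted_eq_of_perm_of_pairwise_lt
        (xs := report) (ys := report.reverse) (key := fun x : Int => x)
        report.reverse_perm hrev
      rw [this, List.reverse_reverse]

lemma head_lt_of_pairwise {r0 r1 : Int} {rest : List Int}
    (h : (r0 :: r1 :: rest).Pairwise (· < ·)) : r0 < r1 := by
  rcases List.pairwise_cons.mp h with ⟨h1, _⟩
  exact h1 r1 (by simp)

lemma head_gt_of_pairwise {r0 r1 : Int} {rest : List Int}
    (h : (r0 :: r1 :: rest).Pairwise (· > ·)) : r0 > r1 := by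
  rcases List.pairwise_cons.mp h with ⟨h1, _⟩
  exact h1 r1 (by simp)

-- ===== VERDICT (by name: the statement is the Claim_ definition above) =====
theorem check_graduality_spec : Claim_equal_check_graduality := by
  intro report _ hpre
  unfold Spec_check_graduality
  match report, hpre with
  | r0 :: r1 :: rest, _ =>
    set l : List Int := r0 :: r1 :: rest with hl
    have e0 : PySem.List.pyGet? l 0 = some r0 := by
      have := PySem.List.pyGet?_natCast (xs := l) (n := 0)
      simpa using this
    have e1 : PySem.List.pyGet? l 1 = some r1 := by
      have := PySem.List.pyGet?_natCast (xs := l) (n := 1)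
      simpa using this
    unfold check_graduality
    rw [e0, e1]
    simp only
    by_cases hdir : r0 > r1
    · rw [if_pos hdir]
      have := chkLoop_drop l (fun l1 l2 => decide (l1 > l2)) l.length 0 (by omega)
      simp only [Int.natCast_zero, List.drop_zero] at this
      rw [this]
      rw [Bool.eq_iff_iff, adj_gt_iff, alt_iff]
      constructor
      · exact fun hp => Or.inr hp
      · rintro (hp | hp)
        · exact absurd (head_lt_of_pairwise hp) (by omega)
        · exact hp
    · rw [if_neg hdir]
      have := chkLoop_drop l (fun l1 l2 => decide (l1 < l2)) l.length 0 (by omega)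
      simp only [Int.natCast_zero, List.drop_zero] at this
      rw [this]
      rw [Bool.eq_iff_iff, adj_lt_iff, alt_iff]
      constructor
      · exact fun hp => Or.inl hp
      · rintro (hp | hp)
        · exact hp
        · exact absurd (head_gt_of_pairwise hp) hdir
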